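-- pv_equiv track=rewrite | github.com/katekitova/zhkh40 | app.py | _trim_docx_parts
-- ===== SOURCE A (Python) =====
-- def _trim_docx_parts(parts):
--     trimmed = []
--
--     for part in parts or []:
--         text = part.get("text") if isinstance(part, dict) else None
--         if text is None or text == "":
--             continue
--         item = {"text": text}
--         href = part.get("href")
--         if href:
--             item["href"] = href
--         trimmed.append(item)
--
--     while trimmed:
--         start_text = trimmed[0]["text"].lstrip()
--         if start_text:
--             trimmed[0]["text"] = start_text
--             break
--         trimmed.pop(0)
--
--     while trimmed:
--         end_text = trimmed[-1]["text"].rstrip()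
--         if end_text:
--             trimmed[-1]["text"] = end_text
--             break
--         trimmed.pop()
--
--     return trimmed
-- ===== SOURCE B (Python) =====
-- def _item(part):
--     text = part.get("text") if isinstance(part, dict) else None
--     if not text:
--         return None
--     href = part.get("href")
--     return {"text": text, "href": href} if href else {"text": text}
--
--
-- def _trim_docx_parts(parts):
--     # One pass: keep a buffer of blank items seen since the last non-blank one,
--     # flush it only when another non-blank item arrives.
--     out = []
--     pending = []
--     for part in parts or []:
--         item = _item(part)
--         if item is None:
--             continue
--         if not item["text"].strip():
--             if out:
--                 pending.append(item)
--         else: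
--             if not out:
--                 item = dict(item, text=item["text"].lstrip())
--             out.extend(pending)
--             pending = []
--             out.append(item)
--     if out:
--         out[-1] = dict(out[-1], text=out[-1]["text"].rstrip())
--     return out
-- ===== Notes on version B (the rewrite author's own statement) =====
-- stated objective: alternative
-- what changed: Replaces A's filter pass followed by two destructive end-trimming while/pop loops with a single forward pass that buffers blank items since the last non-blank one and flushes the buffer only when a later non-blank item arrives, fixing the last element's text once at the end.
import Mathlib
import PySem

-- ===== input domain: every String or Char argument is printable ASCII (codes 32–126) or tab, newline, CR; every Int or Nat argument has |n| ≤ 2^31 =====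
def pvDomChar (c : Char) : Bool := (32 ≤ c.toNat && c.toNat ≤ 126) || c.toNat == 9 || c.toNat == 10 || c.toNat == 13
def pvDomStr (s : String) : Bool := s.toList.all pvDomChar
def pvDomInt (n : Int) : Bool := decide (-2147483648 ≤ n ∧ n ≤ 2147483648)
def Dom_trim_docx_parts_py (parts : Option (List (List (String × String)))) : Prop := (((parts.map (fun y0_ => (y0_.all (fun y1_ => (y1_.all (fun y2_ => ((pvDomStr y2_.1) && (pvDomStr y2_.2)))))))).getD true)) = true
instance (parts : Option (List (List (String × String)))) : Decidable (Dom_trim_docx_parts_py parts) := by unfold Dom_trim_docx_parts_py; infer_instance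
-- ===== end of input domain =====

-- B replaces A's filter pass plus two destructive end-trimming while/pop loops by a single
-- forward pass that buffers blank items and flushes them only when a later non-blank item
-- arrives (objective: alternative decomposition, same cost).

-- ===== PORT A =====
-- shared dict helpers: a Python dict is an insertion-ordered List (String × String)
-- item["text"] — exact here: every item both ports build carries a "text" key
def pvTextOf (item : List (String × String)) : String :=
  PySem.Dict.getD ⟨item⟩ "text" ""
-- item["text"] = v  /  dict(item, text=v): overwrite in place
def pvSetText (item : List (String × String)) (v : String) : List (String × String) :=
  (PySem.Dict.insert ⟨item⟩ "text" v).items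

-- the 'for part in parts or []' filter loop of A
def pvFilterA (parts : List (List (String × String))) : List (List (String × String)) :=
  parts.foldl (fun trimmed part =>
    match PySem.Dict.get? ⟨part⟩ "text" with
    | none => trimmed
    | some text =>
      if text = "" then trimmed
      else
        let item : PySem.Dict String String := ⟨[("text", text)]⟩
        let item := match PySem.Dict.get? ⟨part⟩ "href" with
          | some href => if href ≠ "" then item.insert "href" href else item
          | none => item
        trimmed ++ [item.items]) []

-- A's first while loop: lstrip/pop(0) from the front
def pvFrontA : List (List (String × String)) → List (List (String × String))
  | [] => []
  | item :: rest =>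
    let start_text := PySem.Str.lstrip (pvTextOf item)
    if start_text ≠ "" then pvSetText item start_text :: rest
    else pvFrontA rest

-- A's second while loop (trimmed[-1] / pop()), as the same recursion on the reversed list
def pvBackRevA : List (List (String × String)) → List (List (String × String))
  | [] => []
  | item :: rest =>
    let end_text := PySem.Str.rstrip (pvTextOf item)
    if end_text ≠ "" then pvSetText item end_text :: rest
    else pvBackRevA rest

def trim_docx_parts_py (parts : Option (List (List (String × String)))) : List (List (String × String)) :=
  (pvBackRevA ((pvFrontA (pvFilterA (parts.getD []))).reverse)).reverse

-- ===== PORT B =====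
-- Source B's _item helper
def pvItemB (part : List (String × String)) : Option (List (String × String)) :=
  match PySem.Dict.get? ⟨part⟩ "text" with
  | none => none
  | some text =>
    if text = "" then none
    else
      match PySem.Dict.get? ⟨part⟩ "href" with
      | some href =>
        if href ≠ "" then some [("text", text), ("href", href)] else some [("text", text)]
      | none => some [("text", text)]

-- 'not item["text"].strip()'
def pvBlankB (item : List (String × String)) : Bool :=
  PySem.Str.strip (pvTextOf item) = ""

-- one iteration of Source B's loop over (out, pending)
def pvStepB (st : List (List (String × String)) × List (List (String × String)))
    (part : List (String × String)) :
    List (List (String × String)) × List (List (String × String)) :=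
  match pvItemB part with
  | none => st
  | some item =>
    if pvBlankB item then
      if st.1 ≠ [] then (st.1, st.2 ++ [item]) else st
    else
      let item := if st.1 = [] then pvSetText item (PySem.Str.lstrip (pvTextOf item)) else item
      (st.1 ++ st.2 ++ [item], [])

def trim_docx_parts_py_alt (parts : Option (List (List (String × String)))) : List (List (String × String)) :=
  let out := ((parts.getD []).foldl pvStepB ([], [])).1
  -- 'if out: out[-1] = dict(out[-1], text=out[-1]["text"].rstrip())'
  match out.reverse with
  | [] => []
  | last :: restRev => (pvSetText last (PySem.Str.rstrip (pvTextOf last)) :: restRev).reverse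

-- ===== PRECONDITION & SPEC =====
def Spec_trim_docx_parts_py (parts : Option (List (List (String × String)))) (out : List (List (String × String))) : Prop := out = trim_docx_parts_py_alt parts
instance (parts : Option (List (List (String × String)))) (out : List (List (String × String))) : Decidable (Spec_trim_docx_parts_py parts out) := by unfold Spec_trim_docx_parts_py; infer_instance

-- ===== CLAIM (what is proved, stated in full; the proofs are below) =====
def Claim_equal_trim_docx_parts_py : Prop := ∀ (parts : Option (List (List (String × String)))), Dom_trim_docx_parts_py parts → Spec_trim_docx_parts_py parts (trim_docx_parts_py parts)

-- ===== LEMMAS AND PROOFS =====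

-- canonical forms used by the proof
def pvFixHead (l : List (List (String × String))) : List (List (String × String)) :=
  match l with
  | [] => []
  | h :: t => pvSetText h (PySem.Str.lstrip (pvTextOf h)) :: t

def pvFixHeadR (l : List (List (String × String))) : List (List (String × String)) :=
  match l with
  | [] => []
  | h :: t => pvSetText h (PySem.Str.rstrip (pvTextOf h)) :: t

def pvFixLast (l : List (List (String × String))) : List (List (String × String)) :=
  (pvFixHeadR l.reverse).reverse

-- ---- string facts: the four blankness tests agree ----
theorem pv_chars_lstrip_nil {l : List Char} :
    PySem.Chars.lstrip l = [] ↔ ∀ c ∈ l, PySem.Chars.isspace c = true := by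
  simp [PySem.Chars.lstrip, List.dropWhile_eq_nil_iff]

theorem pv_chars_rstrip_nil {l : List Char} :
    PySem.Chars.rstrip l = [] ↔ ∀ c ∈ l, PySem.Chars.isspace c = true := by
  simp [PySem.Chars.rstrip, List.dropWhile_eq_nil_iff]

theorem pv_chars_strip_nil {l : List Char} :
    PySem.Chars.strip l = [] ↔ ∀ c ∈ l, PySem.Chars.isspace c = true := by
  rw [PySem.Chars.strip, pv_chars_rstrip_nil]
  constructor
  · intro h c hc
    rcases List.mem_append.1 ((List.takeWhile_append_dropWhile (p := PySem.Chars.isspace) (l := l)) ▸ hc) with h1 | h2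
    · exact List.mem_takeWhile_imp h1
    · exact h c h2
  · intro h c hc
    exact h c ((List.dropWhile_sublist _).mem hc)

theorem pv_lstrip_blank (s : String) : (PySem.Str.lstrip s = "") ↔ (PySem.Str.strip s = "") := by
  rw [← String.toList_eq_nil_iff, ← String.toList_eq_nil_iff, PySem.Str.toList_lstrip,
    PySem.Str.toList_strip, pv_chars_lstrip_nil, pv_chars_strip_nil]

theorem pv_rstrip_blank (s : String) : (PySem.Str.rstrip s = "") ↔ (PySem.Str.strip s = "") := by
  rw [← String.toList_eq_nil_iff, ← String.toList_eq_nil_iff, PySem.Str.toList_rstrip,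
    PySem.Str.toList_strip, pv_chars_rstrip_nil, pv_chars_strip_nil]

theorem pv_strip_lstrip (s : String) :
    PySem.Str.strip (PySem.Str.lstrip s) = PySem.Str.strip s := by
  apply String.toList_inj.1
  rw [PySem.Str.toList_strip, PySem.Str.toList_strip, PySem.Str.toList_lstrip,
    PySem.Chars.strip, PySem.Chars.strip, PySem.Chars.lstrip, PySem.Chars.lstrip,
    List.dropWhile_idempotent]

-- ---- dict facts ----
theorem pv_textOf_setText (item : List (String × String)) (v : String) :
    pvTextOf (pvSetText item v) = v := by
  have : (⟨(PySem.Dict.insert ⟨item⟩ "text" v).items⟩ : PySem.Dict String String)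
      = PySem.Dict.insert ⟨item⟩ "text" v := rfl
  rw [pvTextOf, pvSetText, this, PySem.Dict.getD_insert_self]

theorem pv_blank_fixitem (h : List (String × String)) :
    pvBlankB (pvSetText h (PySem.Str.lstrip (pvTextOf h))) = pvBlankB h := by
  rw [pvBlankB, pvBlankB, pv_textOf_setText, pv_strip_lstrip]

theorem pv_insert_href (t h : String) :
    (PySem.Dict.insert (⟨[("text", t)]⟩ : PySem.Dict String String) "href" h).items
      = [("text", t), ("href", h)] := by
  simp [PySem.Dict.insert, PySem.Dict.contains]

-- ---- A's filter pass builds exactly the items of Source B's _item ----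
theorem pv_filterA_aux (parts : List (List (String × String)))
    (acc : List (List (String × String))) :
    parts.foldl (fun trimmed part =>
      match PySem.Dict.get? ⟨part⟩ "text" with
      | none => trimmed
      | some text =>
        if text = "" then trimmed
        else
          let item : PySem.Dict String String := ⟨[("text", text)]⟩
          let item := match PySem.Dict.get? ⟨part⟩ "href" with
            | some href => if href ≠ "" then item.insert "href" href else item
            | none => item
          trimmed ++ [item.items]) acc = acc ++ parts.filterMap pvItemB := by
  induction parts generalizing acc with
  | nil => simp
  | cons p ps ih =>
    rw [List.foldl_cons, List.filterMap_cons, ih]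
    unfold pvItemB
    cases hg : PySem.Dict.get? (⟨p⟩ : PySem.Dict String String) "text" with
    | none => simp
    | some t =>
      by_cases ht : t = "" <;> simp [ht]
      cases hh : PySem.Dict.get? (⟨p⟩ : PySem.Dict String String) "href" with
      | none => simp
      | some h =>
        by_cases hh0 : h = "" <;> simp [hh0, pv_insert_href]

theorem pv_filterA_eq (parts : List (List (String × String))) :
    pvFilterA parts = parts.filterMap pvItemB := by
  rw [pvFilterA, pv_filterA_aux]; simp

-- ---- A's two while loops ----
theorem pv_frontA_eq (l : List (List (String × String))) :
    pvFrontA l = pvFixHead (l.dropWhile pvBlankB) := by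
  induction l with
  | nil => rfl
  | cons h t ih =>
    rw [pvFrontA, List.dropWhile_cons]
    by_cases hb : pvBlankB h
    · have : ¬ (PySem.Str.lstrip (pvTextOf h) ≠ "") := by
        simp only [pvBlankB, decide_eq_true_eq] at hb
        simp [pv_lstrip_blank, hb]
      simp only [this, hb, if_pos]
      simpa using ih
    · have h1 : PySem.Str.lstrip (pvTextOf h) ≠ "" := by
        simp only [pvBlankB, decide_eq_true_eq] at hb
        simp [pv_lstrip_blank, hb]
      rw [if_pos h1]
      simp [pvFixHead, hb]

theorem pv_backRevA_eq (l : List (List (String × String))) :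
    pvBackRevA l = pvFixHeadR (l.dropWhile pvBlankB) := by
  induction l with
  | nil => rfl
  | cons h t ih =>
    rw [pvBackRevA, List.dropWhile_cons]
    by_cases hb : pvBlankB h
    · have : ¬ (PySem.Str.rstrip (pvTextOf h) ≠ "") := by
        simp only [pvBlankB, decide_eq_true_eq] at hb
        simp [pv_rstrip_blank, hb]
      simp only [this, hb, if_pos]
      simpa using ih
    · have h1 : PySem.Str.rstrip (pvTextOf h) ≠ "" := by
        simp only [pvBlankB, decide_eq_true_eq] at hb
        simp [pv_rstrip_blank, hb]
      rw [if_pos h1]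
      simp [pvFixHeadR, hb]

-- ---- generic rdropWhile/rtakeWhile facts ----
theorem pv_rdropWhile_cons {α : Type} (p : α → Bool) (x : α) (t : List α) (hx : p x = false) :
    List.rdropWhile p (x :: t) = x :: List.rdropWhile p t := by
  rw [List.rdropWhile, List.rdropWhile, List.reverse_cons, List.dropWhile_append]
  by_cases h : (List.dropWhile p t.reverse).isEmpty
  · simp only [h, if_pos]
    rw [List.isEmpty_iff] at h
    simp [List.dropWhile, hx, h]
  · simp only [h, if_neg, Bool.false_eq_true, not_false_eq_true]
    simp

theorem pv_rtakeWhile_dropWhile {α : Type} (p : α → Bool) (f : List α)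
    (h : f.dropWhile p ≠ []) :
    List.rtakeWhile p (f.dropWhile p) = List.rtakeWhile p f := by
  induction f with
  | nil => rfl
  | cons x t ih =>
    rw [List.dropWhile_cons]
    by_cases hx : p x
    · simp only [hx, if_pos]
      rw [List.dropWhile_cons, if_pos hx] at h
      rw [ih h]
      rw [List.rtakeWhile, List.rtakeWhile, List.reverse_cons, List.takeWhile_append]
      have hne : (List.takeWhile p t.reverse).length ≠ t.reverse.length := by
        intro hlen
        have heq : List.takeWhile p t.reverse = t.reverse :=
          (List.takeWhile_prefix p).eq_of_length hlen
        have hall : ∀ y ∈ t, p y = true := by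
          intro y hy
          exact List.takeWhile_eq_self_iff.1 heq y (List.mem_reverse.2 hy)
        exact h (List.dropWhile_eq_nil_iff.2 hall)
      rw [if_neg hne]
    · simp [hx]

theorem pv_rdropWhile_dropWhile_ne {α : Type} (p : α → Bool) (f : List α)
    (h : f.dropWhile p ≠ []) : (f.dropWhile p).rdropWhile p ≠ [] := by
  intro hnil
  have hall := List.rdropWhile_eq_nil_iff.1 hnil
  have hhd := List.head_dropWhile_not p h
  exact absurd (hall _ (List.head_mem h)) (by simp [hhd])

theorem pv_fixHead_decomp (d : List (List (String × String)))
    (hd : d ≠ []) (hhd : pvBlankB (d.head hd) = false) :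
    pvFixHead (d.rdropWhile pvBlankB) ++ d.rtakeWhile pvBlankB = pvFixHead d := by
  cases d with
  | nil => simp at hd
  | cons h t =>
    simp only [List.head_cons] at hhd
    rw [pv_rdropWhile_cons _ _ _ hhd]
    have hsplit : (h :: t).rdropWhile pvBlankB ++ (h :: t).rtakeWhile pvBlankB = h :: t :=
      List.rdropWhile_append_rtakeWhile
    rw [pv_rdropWhile_cons _ _ _ hhd] at hsplit
    have ht : t.rdropWhile pvBlankB ++ (h :: t).rtakeWhile pvBlankB = t := by
      simpa using hsplit
    show pvSetText h _ :: (t.rdropWhile pvBlankB ++ (h :: t).rtakeWhile pvBlankB) = _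
    rw [ht]
    rfl

-- ---- the invariant of Source B's single pass ----
def pvInv (parts : List (List (String × String))) :
    List (List (String × String)) × List (List (String × String)) :=
  let f := parts.filterMap pvItemB
  let d := f.dropWhile pvBlankB
  if d = [] then ([], [])
  else (pvFixHead (d.rdropWhile pvBlankB), f.rtakeWhile pvBlankB)

theorem pv_foldB_inv (parts : List (List (String × String))) :
    parts.foldl pvStepB ([], []) = pvInv parts := by
  induction parts using List.reverseRecOn with
  | nil => rfl
  | append_singleton ps q ih =>
    rw [List.foldl_append, List.foldl_cons, List.foldl_nil, ih]
    unfold pvInv pvStepB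
    cases hq : pvItemB q with
    | none =>
      have hfm : (ps ++ [q]).filterMap pvItemB = ps.filterMap pvItemB := by
        simp [List.filterMap_append, hq]
      rw [hfm]
    | some x =>
      simp only [List.filterMap_append, hq, List.filterMap_cons, List.filterMap_nil]
      set f := ps.filterMap pvItemB with hf
      by_cases hb : pvBlankB x
      · by_cases hdnil : f.dropWhile pvBlankB = []
        · have hd' : (f ++ [x]).dropWhile pvBlankB = [] := by
            rw [List.dropWhile_append, if_pos (by simp [hdnil])]
            simp [List.dropWhile, hb]
          simp [hdnil, hd', hb]
        · have hd' : (f ++ [x]).dropWhile pvBlankB = f.dropWhile pvBlankB ++ [x] := by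
            rw [List.dropWhile_append, if_neg (by simp [hdnil])]
          have hcore := pv_rdropWhile_dropWhile_ne pvBlankB f hdnil
          have hout : pvFixHead ((f.dropWhile pvBlankB).rdropWhile pvBlankB) ≠ [] := by
            cases hc : (f.dropWhile pvBlankB).rdropWhile pvBlankB with
            | nil => exact absurd hc hcore
            | cons a b => simp [pvFixHead]
          rw [if_neg hdnil]
          simp only [hb, if_pos, hout, if_neg, ne_eq, not_false_eq_true]
          rw [if_neg (by simp [hd'])]
          rw [hd', List.rdropWhile_concat_pos _ _ _ hb, List.rtakeWhile_concat_pos _ _ _ hb]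
      · by_cases hdnil : f.dropWhile pvBlankB = []
        · have hd' : (f ++ [x]).dropWhile pvBlankB = [x] := by
            rw [List.dropWhile_append, if_pos (by simp [hdnil])]
            simp [List.dropWhile, hb]
          rw [if_pos hdnil, hd']
          rw [if_neg (List.cons_ne_nil x [])]
          rw [show List.rdropWhile pvBlankB [x] = [x] from by
            simpa using List.rdropWhile_concat_neg pvBlankB [] x (by simp [hb])]
          rw [List.rtakeWhile_concat_neg _ _ _ (by simp [hb])]
          simp [pvFixHead, hb]
        · have hd' : (f ++ [x]).dropWhile pvBlankB = f.dropWhile pvBlankB ++ [x] := by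
            rw [List.dropWhile_append, if_neg (by simp [hdnil])]
          have hcore := pv_rdropWhile_dropWhile_ne pvBlankB f hdnil
          have hout : pvFixHead ((f.dropWhile pvBlankB).rdropWhile pvBlankB) ≠ [] := by
            cases hc : (f.dropWhile pvBlankB).rdropWhile pvBlankB with
            | nil => exact absurd hc hcore
            | cons a b => simp [pvFixHead]
          rw [if_neg hdnil]
          simp only [hb, Bool.false_eq_true, if_false]
          rw [if_neg hout]
          rw [hd']
          rw [if_neg (by simp)]
          rw [List.rdropWhile_concat_neg _ _ _ (by simp [hb])]
          rw [List.rtakeWhile_concat_neg _ _ _ (by simp [hb])]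
          have hhd := List.head_dropWhile_not pvBlankB hdnil
          rw [← pv_rtakeWhile_dropWhile pvBlankB f hdnil]
          have hdec := pv_fixHead_decomp (f.dropWhile pvBlankB) hdnil hhd
          cases hdd : f.dropWhile pvBlankB with
          | nil => exact absurd hdd hdnil
          | cons a b =>
            rw [hdd] at hdec
            rw [hdec]
            simp [pvFixHead]

-- ---- both sides reach the same canonical trim ----
theorem pv_A_canon (f : List (List (String × String))) :
    (pvBackRevA ((pvFrontA f).reverse)).reverse =
      pvFixLast (pvFixHead ((f.dropWhile pvBlankB).rdropWhile pvBlankB)) := by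
  rw [pv_frontA_eq, pv_backRevA_eq]
  cases hd : f.dropWhile pvBlankB with
  | nil => rfl
  | cons h t =>
    have hhd : pvBlankB h = false := by
      have h0 : f.dropWhile pvBlankB ≠ [] := by rw [hd]; simp
      have h1 := List.head_dropWhile_not pvBlankB h0
      simp only [hd, List.head_cons] at h1
      exact h1
    have hfix : pvBlankB (pvSetText h (PySem.Str.lstrip (pvTextOf h))) = false := by
      rw [pv_blank_fixitem, hhd]
    have h1 : (pvFixHead (h :: t)).reverse.dropWhile pvBlankB
        = (List.rdropWhile pvBlankB (pvFixHead (h :: t))).reverse := by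
      rw [List.rdropWhile, List.reverse_reverse]
    rw [h1]
    show (pvFixHeadR (List.rdropWhile pvBlankB (pvFixHead (h :: t))).reverse).reverse = _
    have h2 : List.rdropWhile pvBlankB (pvFixHead (h :: t))
        = pvSetText h (PySem.Str.lstrip (pvTextOf h)) :: List.rdropWhile pvBlankB t := by
      show List.rdropWhile pvBlankB (pvSetText h (PySem.Str.lstrip (pvTextOf h)) :: t) = _
      exact pv_rdropWhile_cons _ _ _ hfix
    rw [h2, pv_rdropWhile_cons _ _ _ hhd]
    rfl

theorem pv_B_fixLast (out : List (List (String × String))) :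
    (match out.reverse with
     | [] => ([] : List (List (String × String)))
     | last :: restRev => (pvSetText last (PySem.Str.rstrip (pvTextOf last)) :: restRev).reverse)
      = pvFixLast out := by
  rw [pvFixLast]
  cases out.reverse with
  | nil => rfl
  | cons a b => rfl

theorem pv_B_canon (parts : List (List (String × String))) :
    trim_docx_parts_py_alt (some parts) =
      pvFixLast (pvFixHead (((parts.filterMap pvItemB).dropWhile pvBlankB).rdropWhile pvBlankB)) := by
  show (match ((parts.foldl pvStepB ([], [])).1).reverse with
        | [] => ([] : List (List (String × String)))
        | last :: restRev => (pvSetText last (PySem.Str.rstrip (pvTextOf last)) :: restRev).reverse)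
      = _
  rw [pv_foldB_inv, pv_B_fixLast, pvInv]
  by_cases hd : (parts.filterMap pvItemB).dropWhile pvBlankB = []
  · rw [if_pos hd, hd]
    rfl
  · rw [if_neg hd]

-- ===== VERDICT (by name: the statement is the Claim_ definition above) =====
theorem trim_docx_parts_py_spec : Claim_equal_trim_docx_parts_py := by
  intro parts _
  unfold Spec_trim_docx_parts_py
  cases parts with
  | none => rfl
  | some ps =>
    show (pvBackRevA ((pvFrontA (pvFilterA ps)).reverse)).reverse = _
    rw [pv_filterA_eq, pv_A_canon, pv_B_canon]
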